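-- pv_equiv track=rewrite | github.com/md143rbh7f/competitions | hackerrank/world-codesprint-6/bonetrousle.py | work
-- ===== SOURCE A (Python) =====
-- def work(n, k, b):
--     lo, hi = (b + 1) * b // 2, b * (2 * k - b + 1) // 2
--     if not (lo <= n <= hi):
--         yield -1
--         return
--
--     while b:
--         m = min(k, n - b * (b - 1) // 2)
--         n -= m
--         k = m - 1
--         b -= 1
--         yield m
-- ===== SOURCE B (Python) =====
-- def work(n, k, b):
--     lo = b * (b + 1) // 2
--     hi = b * (2 * k - b + 1) // 2
--     if not (lo <= n <= hi):
--         yield -1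
--         return
--     r = n - lo                     # surplus over the minimal choice 1..b
--     if r == 0:
--         yield from range(b, 0, -1)
--         return
--     g = k - b                      # gain from fully raising one slot to its cap
--     t = r // g                     # number of top slots raised all the way
--     rem = r % g                    # partial raise for the next slot
--     if t < b:
--         yield from range(k, k - t, -1)
--         yield b - t + rem
--         yield from range(b - t - 1, 0, -1)
--     else:
--         yield from range(k, k - b, -1)
-- ===== Notes on version B (the rewrite author's own statement) =====
-- stated objective: alternative
-- what changed: A runs a b-step greedy loop re-deriving each value via min(k, n - b*(b-1)//2) with mutating n, k, b; B computes the surplus split in closed form (t = r // g full slots at the cap, one partially raised slot, the untouched base) and emits three ready-made descending ranges.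
-- outside the precondition, e.g. on work(0, -1, -1): A does not finish within the time limit, B returns []
import Mathlib
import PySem

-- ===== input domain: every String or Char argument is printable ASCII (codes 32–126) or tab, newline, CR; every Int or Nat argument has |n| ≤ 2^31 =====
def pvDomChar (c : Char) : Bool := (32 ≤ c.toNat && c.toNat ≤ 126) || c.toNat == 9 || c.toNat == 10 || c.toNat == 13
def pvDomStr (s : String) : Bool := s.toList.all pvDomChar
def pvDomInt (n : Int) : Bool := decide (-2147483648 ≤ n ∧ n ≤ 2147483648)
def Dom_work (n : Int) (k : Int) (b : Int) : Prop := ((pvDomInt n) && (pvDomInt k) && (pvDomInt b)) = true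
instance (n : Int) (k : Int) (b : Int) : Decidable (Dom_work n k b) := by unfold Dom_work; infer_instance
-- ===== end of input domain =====

-- B replaces A's per-slot greedy loop by a closed-form split of the surplus (t = r // g full
-- slots, one partial slot, then the untouched base), emitting the same descending sequence.

-- ===== PORT A =====
-- the 'while b:' loop; fuel = b.toNat (Python diverges for b < 0 past the feasibility test;
-- those inputs are excluded by Pre_work below)
def workLoop (n : Int) (k : Int) (b : Int) : Nat → List Int
  | 0 => []
  | fuel+1 =>
    if b = 0 then [] else
      let m := min k (n - PySem.Int.floordiv (b * (b - 1)) 2)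
      m :: workLoop (n - m) (m - 1) (b - 1) fuel

def work (n : Int) (k : Int) (b : Int) : List Int :=
  let lo := PySem.Int.floordiv ((b + 1) * b) 2
  let hi := PySem.Int.floordiv (b * (2 * k - b + 1)) 2
  if lo ≤ n ∧ n ≤ hi then workLoop n k b b.toNat else [-1]

-- ===== PORT B =====
-- transcription of Python's range(a, c, -1)
def descRange (a : Int) (c : Int) : List Int :=
  if c < a then a :: descRange (a - 1) c else []
termination_by (a - c).toNat

def work_alt (n : Int) (k : Int) (b : Int) : List Int :=
  let lo := PySem.Int.floordiv (b * (b + 1)) 2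
  let hi := PySem.Int.floordiv (b * (2 * k - b + 1)) 2
  if lo ≤ n ∧ n ≤ hi then
    let r := n - lo
    if r = 0 then descRange b 0
    else
      let g := k - b
      let t := PySem.Int.floordiv r g
      let rem := PySem.Int.mod r g
      if t < b then descRange k (k - t) ++ (b - t + rem) :: descRange (b - t - 1) 0
      else descRange k (k - b)
  else [-1]

-- ===== PRECONDITION & SPEC =====
-- Pre_work excludes only b < 0 with the feasibility test passing: there Python A's
-- 'while b:' loop never terminates (A returns no value at all).
def Pre_work (n : Int) (k : Int) (b : Int) : Prop :=
  0 ≤ b ∨ ¬(PySem.Int.floordiv ((b + 1) * b) 2 ≤ n ∧ n ≤ PySem.Int.floordiv (b * (2 * k - b + 1)) 2)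
instance (n : Int) (k : Int) (b : Int) : Decidable (Pre_work n k b) := by unfold Pre_work; infer_instance
def pvWitness_work : Int × Int × Int := (12, 5, 3)

def Spec_work (n : Int) (k : Int) (b : Int) (out : List Int) : Prop := out = work_alt n k b
instance (n : Int) (k : Int) (b : Int) (out : List Int) : Decidable (Spec_work n k b out) := by unfold Spec_work; infer_instance

-- ===== CLAIM (what is proved, stated in full; the proofs are below) =====
def Claim_equal_work : Prop := ∀ (n : Int) (k : Int) (b : Int), Dom_work n k b → Pre_work n k b → Spec_work n k b (work n k b)

-- ===== LEMMAS AND PROOFS =====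

lemma fdiv2 (c : Int) : PySem.Int.floordiv (2 * c) 2 = c := by
  rw [PySem.Int.floordiv_eq_ediv_of_pos (by omega)]; omega

lemma descRange_cons {a c : Int} (h : c < a) : descRange a c = a :: descRange (a - 1) c := by
  rw [descRange]; simp [h]

lemma descRange_nil {a c : Int} (h : a ≤ c) : descRange a c = [] := by
  rw [descRange]; simp [not_lt.mpr h]

-- the surplus-free tail: with n exactly the minimal feasible sum, the greedy emits b, b-1, …, 1
lemma loop_base : ∀ (fuel : Nat) (n k b c : Int), b.toNat = fuel → 0 ≤ b → (0 < b → b ≤ k) →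
    b * (b - 1) = 2 * c → n = c + b → workLoop n k b fuel = descRange b 0 := by
  intro fuel
  induction fuel with
  | zero =>
    intro n k b c hf hb _ _ _
    have hb0 : b = 0 := by omega
    subst hb0
    simp [workLoop, descRange_nil (by omega : (0:Int) ≤ 0)]
  | succ fuel ih =>
    intro n k b c hf hb hk hc hn
    by_cases hb0 : b = 0
    · subst hb0; simp [workLoop, descRange_nil (by omega : (0:Int) ≤ 0)]
    · have hb1 : 1 ≤ b := by omega
      have hmdiv : PySem.Int.floordiv (b * (b - 1)) 2 = c := by rw [hc]; exact fdiv2 c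
      have hm : min k (n - PySem.Int.floordiv (b * (b - 1)) 2) = b := by
        rw [hmdiv, hn]
        have : c + b - c = b := by ring
        rw [this, min_eq_right (hk hb1)]
      rw [workLoop]
      simp only [hb0, if_false, hm]
      have hnb : n - b = c := by omega
      rw [hnb]
      rw [ih c (b - 1) (b - 1) (c - (b - 1)) (by omega) (by omega) (by omega)
            (by linear_combination hc) (by ring)]
      rw [descRange_cons (by omega : (0:Int) < b)]

-- closed form for the greedy's output once the input is feasible
def cfE (k b r g : Int) : List Int :=
  if r = 0 then descRange b 0
  else if PySem.Int.floordiv r g < b then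
    descRange k (k - PySem.Int.floordiv r g) ++
      (b - PySem.Int.floordiv r g + PySem.Int.mod r g) :: descRange (b - PySem.Int.floordiv r g - 1) 0
  else descRange k (k - b)

lemma loop_main : ∀ (fuel : Nat) (n k b c : Int), b.toNat = fuel → 0 ≤ b →
    b * (b - 1) = 2 * c → c + b ≤ n → n ≤ k * b - c →
    workLoop n k b fuel = cfE k b (n - (c + b)) (k - b) := by
  intro fuel
  induction fuel with
  | zero =>
    intro n k b c hf hb hc hlo hhi
    have hb0 : b = 0 := by omega
    subst hb0
    have hc0 : c = 0 := by omega
    have hn0 : n = 0 := by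
      have hk0 : k * 0 = 0 := by ring
      omega
    subst hc0; subst hn0
    simp [workLoop, cfE, descRange_nil (le_refl (0:Int))]
  | succ fuel ih =>
    intro n k b c hf hb hc hlo hhi
    by_cases hb0 : b = 0
    · subst hb0
      have hc0 : c = 0 := by omega
      have hn0 : n = 0 := by
        have hk0 : k * 0 = 0 := by ring
        omega
      subst hc0; subst hn0
      simp [workLoop, cfE, descRange_nil (le_refl (0:Int))]
    · have hb1 : 1 ≤ b := by omega
      obtain ⟨g, rfl⟩ : ∃ g, k = b + g := ⟨k - b, by ring⟩
      obtain ⟨r, rfl⟩ : ∃ r, n = c + b + r := ⟨n - (c + b), by ring⟩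
      have hr0 : 0 ≤ r := by omega
      have hrbg : r ≤ b * g := by
        have h1 : (b + g) * b - c = b * g + c + b := by linear_combination hc
        linarith [hhi]
      have hg0 : 0 ≤ g := by
        by_contra hgneg
        have hgneg' : g < 0 := by omega
        have := mul_neg_of_pos_of_neg (show (0:Int) < b by omega) hgneg'
        linarith
      have hmdiv : PySem.Int.floordiv (b * (b - 1)) 2 = c := by rw [hc]; exact fdiv2 c
      have e1 : c + b + r - (c + b) = r := by ring
      have e2 : b + g - b = g := by ring
      rw [e1, e2, workLoop]
      simp only [hb0, if_false, hmdiv]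
      have e3 : c + b + r - c = b + r := by ring
      rw [e3]
      by_cases hr00 : r = 0
      · subst hr00
        have hm : min (b + g) (b + 0) = b := by
          rw [min_eq_right (by omega)]; ring
        rw [hm]
        have e4 : c + b + 0 - b = c := by ring
        rw [e4, loop_base fuel c (b - 1) (b - 1) (c - (b - 1)) (by omega) (by omega)
              (fun _ => by omega) (by linear_combination hc) (by ring)]
        rw [cfE, if_pos rfl, descRange_cons (show (0:Int) < b by omega)]
      · have hrpos : 1 ≤ r := by omega
        have hg1 : 1 ≤ g := by
          by_contra hgle
          have h0 : b * g ≤ b * 0 := mul_le_mul_of_nonneg_left (by omega) (by omega)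
          have h0' : b * 0 = 0 := by ring
          linarith
        have htr : PySem.Int.floordiv r g * g + PySem.Int.mod r g = r :=
          PySem.Int.floordiv_mul_add_mod r g
        have hrem0 : 0 ≤ PySem.Int.mod r g := PySem.Int.mod_nonneg r (by omega)
        have hremlt : PySem.Int.mod r g < g := PySem.Int.mod_lt r (by omega)
        obtain ⟨t, rem, htr, hrem0, hremlt, htdef, hremdef⟩ :
            ∃ t rem, t * g + rem = r ∧ 0 ≤ rem ∧ rem < g ∧
              PySem.Int.floordiv r g = t ∧ PySem.Int.mod r g = rem :=
          ⟨_, _, htr, hrem0, hremlt, rfl, rfl⟩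
        have ht0 : 0 ≤ t := by
          by_contra htneg
          have : t * g ≤ (-1) * g := mul_le_mul_of_nonneg_right (by omega) (by omega)
          linarith
        have htb : t ≤ b := by
          by_contra htgt
          have h1 : (b + 1) * g ≤ t * g := mul_le_mul_of_nonneg_right (by omega) (by omega)
          have h2 : (b + 1) * g = b * g + g := by ring
          linarith
        by_cases hgr : g ≤ r
        · -- at least one full slot: the greedy takes m = k = b + g
          have ht1 : 1 ≤ t := by
            by_contra ht1'
            have ht00 : t = 0 := by omega
            rw [ht00] at htr
            simp at htr
            omega
          have hm : min (b + g) (b + r) = b + g := min_eq_left (by omega)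
          rw [hm]
          have e5 : c + b + r - (b + g) = (c - (b - 1)) + (b - 1) + (r - g) := by ring
          have e6 : b + g - 1 = (b - 1) + g := by ring
          rw [e5, e6, ih ((c - (b - 1)) + (b - 1) + (r - g)) ((b - 1) + g) (b - 1) (c - (b - 1))
                (by omega) (by omega) (by linear_combination hc) (by omega)
                (by
                  have h2 : ((b - 1) + g) * (b - 1) - (c - (b - 1)) =
                      (b - 1) * g + (c - (b - 1)) + (b - 1) := by linear_combination hc
                  have h3 : (b - 1) * g = b * g - g := by ring
                  linarith [hrbg])]
          have e7 : (c - (b - 1)) + (b - 1) + (r - g) - ((c - (b - 1)) + (b - 1)) = r - g := by ring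
          have e8 : (b - 1) + g - (b - 1) = g := by ring
          rw [e7, e8]
          -- t and rem for the reduced surplus r - g
          have htdef' : PySem.Int.floordiv (r - g) g = t - 1 := by
            rw [PySem.Int.floordiv_eq_iff_of_pos (by omega)]
            have h4 : (t - 1) * g = t * g - g := by ring
            have h5 : (t - 1 + 1) * g = t * g := by ring
            constructor <;> linarith
          have hremdef' : PySem.Int.mod (r - g) g = rem := by
            have h := PySem.Int.floordiv_mul_add_mod (r - g) g
            rw [htdef'] at h
            have h4 : (t - 1) * g = t * g - g := by ring
            linarith
          simp only [cfE, htdef, hremdef, htdef', hremdef']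
          rw [if_neg hr00]
          by_cases htlb : t < b
          · rw [if_pos htlb]
            by_cases hrg0 : r - g = 0
            · -- exactly one full slot, no remainder
              have ht11 : t = 1 := by
                by_contra ht11'
                have h6 : 2 * g ≤ t * g := mul_le_mul_of_nonneg_right (by omega) (by omega)
                linarith
              have hrem00 : rem = 0 := by rw [ht11] at htr; linarith
              rw [if_pos hrg0, ht11, hrem00]
              have hb2 : 2 ≤ b := by omega
              rw [descRange_cons (show b + g - 1 < b + g by omega),
                  descRange_nil (le_refl (b + g - 1)),
                  descRange_cons (show (0:Int) < b - 1 by omega)]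
              simp only [List.cons_append, List.nil_append]
              norm_num
            · rw [if_neg hrg0]
              have htlb' : t - 1 < b - 1 := by omega
              rw [if_pos htlb']
              have e9 : b - 1 + g - (t - 1) = b + g - t := by ring
              have e10 : b - 1 - (t - 1) + rem = b - t + rem := by ring
              have e11 : b - 1 - (t - 1) - 1 = b - t - 1 := by ring
              have e6' : b - 1 + g = b + g - 1 := by ring
              rw [e9, e10, e11, e6', descRange_cons (show b + g - t < b + g by omega)]
              simp only [List.cons_append]
          · -- every slot full: t = b, rem = 0, output k, k-1, …, k-b+1
            rw [if_neg htlb]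
            have htb' : t = b := by omega
            have hrem00 : rem = 0 := by rw [htb'] at htr; linarith
            have hrbg' : r = b * g := by rw [htb'] at htr; linarith
            have e12 : b + g - b = g := by ring
            rw [e12, descRange_cons (show g < b + g by omega)]
            by_cases hrg0 : r - g = 0
            · rw [if_pos hrg0]
              have hb11 : b = 1 := by
                have h7 : (b - 1) * g = 0 := by
                  have h8 : (b - 1) * g = b * g - g := by ring
                  linarith
                rcases mul_eq_zero.mp h7 with h9 | h9 <;> omega
              rw [hb11]
              norm_num [descRange_nil (le_refl (0:Int)), descRange_nil (le_refl (g:Int))]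
            · rw [if_neg hrg0]
              have : ¬ (t - 1 < b - 1) := by omega
              rw [if_neg this]
              have e13 : b - 1 + g - (b - 1) = g := by ring
              have e13' : b - 1 + g = b + g - 1 := by ring
              rw [e13, e13']
        · -- no full slot: the greedy takes m = b + r and the rest is the untouched base
          have hgr2 : r < g := by omega
          have ht00 : t = 0 := by
            by_contra h'
            have ht1 : 1 ≤ t := by omega
            have h10 : 1 * g ≤ t * g := mul_le_mul_of_nonneg_right (by omega) (by omega)
            linarith
          have hremr : rem = r := by rw [ht00] at htr; linarith [htr]
          have hm : min (b + g) (b + r) = b + r := min_eq_right (by omega)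
          rw [hm]
          have e14 : c + b + r - (b + r) = c := by ring
          rw [e14, loop_base fuel c (b + r - 1) (b - 1) (c - (b - 1)) (by omega) (by omega)
                (fun _ => by omega) (by linear_combination hc) (by ring)]
          simp only [cfE, htdef, hremdef, ht00, hremr]
          rw [if_neg hr00, if_pos (show (0:Int) < b by omega)]
          have e15 : b + g - 0 = b + g := by ring
          have e16 : b - 0 + r = b + r := by ring
          have e17 : b - 0 - 1 = b - 1 := by ring
          rw [e15, e16, e17, descRange_nil (le_refl (b + g)), List.nil_append]

-- ===== VERDICT (by name: the statement is the Claim_ definition above) =====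
theorem work_spec : Claim_equal_work := by
  intro n k b _ hpre
  unfold Spec_work work work_alt
  obtain ⟨c, hcc⟩ := Int.even_mul_succ_self (b - 1)
  have hc : b * (b - 1) = 2 * c := by linear_combination hcc
  have hloA : PySem.Int.floordiv ((b + 1) * b) 2 = c + b := by
    have h : (b + 1) * b = 2 * (c + b) := by linear_combination hc
    rw [h, fdiv2]
  have hloB : PySem.Int.floordiv (b * (b + 1)) 2 = c + b := by
    have h : b * (b + 1) = 2 * (c + b) := by linear_combination hc
    rw [h, fdiv2]
  have hhi : PySem.Int.floordiv (b * (2 * k - b + 1)) 2 = k * b - c := by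
    have h : b * (2 * k - b + 1) = 2 * (k * b - c) := by linear_combination -hc
    rw [h, fdiv2]
  simp only [hloA, hloB, hhi]
  by_cases hfeas : c + b ≤ n ∧ n ≤ k * b - c
  · rw [if_pos hfeas, if_pos hfeas]
    have hbpos : 0 ≤ b := by
      rcases hpre with h | h
      · exact h
      · exfalso; rw [hloA, hhi] at h; exact h hfeas
    rw [loop_main b.toNat n k b c rfl hbpos hc hfeas.1 hfeas.2]
    simp only [cfE]
  · rw [if_neg hfeas, if_neg hfeas]
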